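-- pv_equiv track=rewrite | github.com/Enjef/Algo | 1100 - 1199/1170 - Compare Strings by Frequency of the Smallest Character/1170 - Compare Strings by Frequency of the Smallest Character.py | numSmallerByFrequency_best_memory
-- ===== SOURCE A (Python) =====
-- from typing import List
--
-- def numSmallerByFrequency_best_memory(queries: List[str], words: List[str]) -> List[int]:
--     for i, q in enumerate(queries):
--         queries[i] = q.count(min(q))
--     for i, l in enumerate(words):
--         words[i] = l.count(min(l))
--     result = []
--     for q in queries:
--         counter = 0
--         for w in words:
--             if w > q:
--                 counter += 1
--         result.append(counter)
--     return result
-- ===== SOURCE B (Python) =====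
-- from typing import List
-- from bisect import bisect_right
--
-- def _freq(s: str) -> int:
--     return s.count(min(s))
--
-- def numSmallerByFrequency_best_memory(queries: List[str], words: List[str]) -> List[int]:
--     wf = sorted(_freq(w) for w in words)
--     n = len(wf)
--     return [n - bisect_right(wf, _freq(q)) for q in queries]
-- ===== Notes on version B (the rewrite author's own statement) =====
-- stated objective: faster
-- what changed: B computes each word's smallest-char frequency once, sorts these frequencies, and answers each query with one bisect_right binary search instead of A's per-query linear scan over all words; B also leaves the argument lists unmutated (A overwrites them in place).
-- outside the precondition, e.g. on numSmallerByFrequency_best_memory([''], ['a']): A raises ValueError, B raises ValueError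
import Mathlib
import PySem

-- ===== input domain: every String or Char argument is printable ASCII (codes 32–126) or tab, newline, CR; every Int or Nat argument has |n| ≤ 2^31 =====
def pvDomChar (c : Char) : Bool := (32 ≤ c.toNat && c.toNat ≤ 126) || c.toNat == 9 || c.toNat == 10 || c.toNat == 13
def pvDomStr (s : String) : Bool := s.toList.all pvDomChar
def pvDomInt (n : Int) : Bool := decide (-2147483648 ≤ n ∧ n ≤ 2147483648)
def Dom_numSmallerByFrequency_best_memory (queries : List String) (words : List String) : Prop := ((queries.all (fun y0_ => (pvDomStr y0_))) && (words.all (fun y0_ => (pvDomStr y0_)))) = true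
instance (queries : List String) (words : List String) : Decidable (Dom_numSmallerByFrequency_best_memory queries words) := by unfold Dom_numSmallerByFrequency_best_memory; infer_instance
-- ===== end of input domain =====

-- B sorts the word frequencies once and answers each query by binary search (bisect_right)
-- instead of A's per-query linear scan over all words; return-value equivalence only:
-- A overwrites its argument lists in place, B does not mutate its arguments.

-- shared helper: q.count(min(q)), the frequency of the smallest character
-- (both Pythons compute exactly this expression; value 0 for "" is unreachable under Pre_,
-- where Python's min raises)
def pvFreq (s : String) : Int :=
  match PySem.List.min? s.toList (fun c => c) with
  | some m => (s.toList.count m : Int)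
  | none => 0

-- ===== PORT A =====
def numSmallerByFrequency_best_memory (queries : List String) (words : List String) : List Int :=
  let qs := queries.map pvFreq
  let ws := words.map pvFreq
  qs.foldl (fun result q =>
    result ++ [ws.foldl (fun counter w => if w > q then counter + 1 else counter) 0]) []

-- ===== PORT B =====
def numSmallerByFrequency_best_memory_alt (queries : List String) (words : List String) : List Int :=
  let wf := PySem.List.sorted (words.map pvFreq) (fun x => x) false
  let n := wf.length
  queries.map (fun q => (n : Int) - (PySem.List.bisectRight wf (pvFreq q) : Int))

-- ===== PRECONDITION & SPEC =====
-- Pre_ excludes an empty string in either list: Python's min("") raises ValueError there.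
def Pre_numSmallerByFrequency_best_memory (queries : List String) (words : List String) : Prop :=
  (∀ q ∈ queries, q ≠ "") ∧ (∀ w ∈ words, w ≠ "")
instance (queries : List String) (words : List String) : Decidable (Pre_numSmallerByFrequency_best_memory queries words) := by unfold Pre_numSmallerByFrequency_best_memory; infer_instance

def pvWitness_numSmallerByFrequency_best_memory : List String × List String := (["aabb", "cc"], ["a", "bbb"])

def Spec_numSmallerByFrequency_best_memory (queries : List String) (words : List String) (out : List Int) : Prop := out = numSmallerByFrequency_best_memory_alt queries words
instance (queries : List String) (words : List String) (out : List Int) : Decidable (Spec_numSmallerByFrequency_best_memory queries words out) := by unfold Spec_numSmallerByFrequency_best_memory; infer_instance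

-- ===== CLAIM (what is proved, stated in full; the proofs are below) =====
def Claim_equal_numSmallerByFrequency_best_memory : Prop := ∀ (queries : List String) (words : List String), Dom_numSmallerByFrequency_best_memory queries words → Pre_numSmallerByFrequency_best_memory queries words → Spec_numSmallerByFrequency_best_memory queries words (numSmallerByFrequency_best_memory queries words)

-- ===== LEMMAS AND PROOFS =====

-- the ≤-count and the >-count of a pivot partition a list's length
lemma countP_le_add_gt (l : List Int) (x : Int) :
    l.countP (fun w => decide (w ≤ x)) + l.countP (fun w => decide (x < w)) = l.length := by
  induction l with
  | nil => simp
  | cons a t ih =>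
    by_cases h : a ≤ x <;>
      simp [List.countP_cons, h, not_le.mp, ih] <;> omega

-- on a ≤-sorted list, bisect_right x is the number of elements ≤ x
lemma bisectRight_eq_countP (wf : List Int) (x : Int)
    (h : wf.Pairwise (fun a b => a ≤ b)) :
    PySem.List.bisectRight wf x = wf.countP (fun w => decide (w ≤ x)) := by
  obtain ⟨hle, hlo, hhi⟩ := PySem.List.bisectRight_spec wf x h
  set r := PySem.List.bisectRight wf x with hr
  have hsplit : wf = wf.take r ++ wf.drop r := (List.take_append_drop r wf).symm
  have h1 : (wf.take r).countP (fun w => decide (w ≤ x)) = r := by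
    rw [List.countP_eq_length.2, List.length_take, Nat.min_eq_left hle]
    intro a ha
    obtain ⟨j, hj, rfl⟩ := List.mem_iff_getElem.1 ha
    have hjlen : j < wf.length := by simp [List.length_take] at hj; omega
    have := hlo j hjlen (by simp [List.length_take] at hj; omega)
    simpa [List.getElem_take] using this
  have h2 : (wf.drop r).countP (fun w => decide (w ≤ x)) = 0 := by
    rw [List.countP_eq_zero]
    intro a ha
    obtain ⟨j, hj, rfl⟩ := List.mem_iff_getElem.1 ha
    have hjlen : r + j < wf.length := by simp at hj; omega
    have := hhi (r + j) hjlen (by omega)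
    simp [List.getElem_drop]
    omega
  calc r = (wf.take r).countP (fun w => decide (w ≤ x)) + (wf.drop r).countP (fun w => decide (w ≤ x)) := by
          simp [h1, h2]
    _ = wf.countP (fun w => decide (w ≤ x)) := by
          rw [← List.countP_append, ← hsplit]

lemma perQuery (ws : List Int) (x : Int) :
    (ws.foldl (fun counter w => if w > x then counter + 1 else counter) 0 : Int)
      = ((PySem.List.sorted ws (fun y => y) false).length : Int)
        - (PySem.List.bisectRight (PySem.List.sorted ws (fun y => y) false) x : Int) := by
  set wf := PySem.List.sorted ws (fun y => y) false with hwf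
  have hpair : wf.Pairwise (fun a b => a ≤ b) := by
    simpa using PySem.List.sorted_pairwise (xs := ws) (key := fun y => y)
  rw [bisectRight_eq_countP wf x hpair]
  have hperm : wf.Perm ws := PySem.List.sorted_perm ..
  have hA : ws.foldl (fun counter w => if w > x then counter + 1 else counter) 0
      = (0 : Int) + (ws.countP (fun w => decide (x < w)) : Int) :=
    by simpa using PySem.List.foldl_if_add_one (fun w => decide (x < w)) ws 0
  rw [hA]
  have hcnt : wf.countP (fun w => decide (x < w)) = ws.countP (fun w => decide (x < w)) :=
    hperm.countP_eq _
  have hsum : wf.countP (fun w => decide (w ≤ x)) + wf.countP (fun w => decide (x < w)) = wf.length :=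
    countP_le_add_gt wf x
  have hlen : wf.length = ws.length := hperm.length_eq
  omega

-- ===== VERDICT (by name: the statement is the Claim_ definition above) =====
theorem numSmallerByFrequency_best_memory_spec : Claim_equal_numSmallerByFrequency_best_memory := by
  intro queries words _ _
  unfold Spec_numSmallerByFrequency_best_memory
  unfold numSmallerByFrequency_best_memory numSmallerByFrequency_best_memory_alt
  rw [PySem.List.foldl_append_singleton_eq_map, List.map_map]
  apply List.map_congr_left
  intro q _
  exact perQuery (words.map pvFreq) (pvFreq q)
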